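-- pv_equiv track=rewrite | github.com/ShirokoKun/Monovision-project | monovision_v2/fusion/vision_fusion_module.py | _generate_scene_context
-- ===== SOURCE A (Python) =====
-- from typing import Dict, List, Any, Optional, Tuple
--
-- def _generate_scene_context(clip_keywords: List[str], blip_caption: str) -> Dict[str, Any]:
--     """
--     Generate scene context from CLIP keywords and BLIP caption
--     """
--     # Categorize keywords
--     environment_keywords = ['indoor', 'outdoor', 'natural', 'artificial', 'urban', 'rural']
--     lighting_keywords = ['bright', 'dark', 'sunny', 'shadowy', 'illuminated']
--     mood_keywords = ['peaceful', 'busy', 'chaotic', 'serene', 'active', 'static']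
--     style_keywords = ['modern', 'vintage', 'classic', 'contemporary', 'traditional']
--
--     context = {
--         "environment": [kw for kw in clip_keywords if kw in environment_keywords],
--         "lighting": [kw for kw in clip_keywords if kw in lighting_keywords],
--         "mood": [kw for kw in clip_keywords if kw in mood_keywords],
--         "style": [kw for kw in clip_keywords if kw in style_keywords],
--         "characteristics": []
--     }
--
--     # Generate characteristics based on context
--     if context["environment"]:
--         context["characteristics"].append(f"{context['environment'][0]} setting")
--     if context["lighting"]:
--         context["characteristics"].append(f"{context['lighting'][0]} lighting")
--     if context["mood"]:
--         context["characteristics"].append(f"{context['mood'][0]} atmosphere")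
--
--     return context
-- ===== SOURCE B (Python) =====
-- _CATEGORY_OF = {kw: cat for cat, kws in (
--     ("environment", ['indoor', 'outdoor', 'natural', 'artificial', 'urban', 'rural']),
--     ("lighting", ['bright', 'dark', 'sunny', 'shadowy', 'illuminated']),
--     ("mood", ['peaceful', 'busy', 'chaotic', 'serene', 'active', 'static']),
--     ("style", ['modern', 'vintage', 'classic', 'contemporary', 'traditional']),
-- ) for kw in kws}
--
--
-- def _generate_scene_context(clip_keywords, blip_caption):
--     """Single table-driven pass routing each keyword to its bucket."""
--     context = {"environment": [], "lighting": [], "mood": [], "style": [],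
--                "characteristics": []}
--     for kw in clip_keywords:
--         cat = _CATEGORY_OF.get(kw)
--         if cat is not None:
--             context[cat].append(kw)
--     chars = context["characteristics"]
--     if context["environment"]:
--         chars.append(f"{context['environment'][0]} setting")
--     if context["lighting"]:
--         chars.append(f"{context['lighting'][0]} lighting")
--     if context["mood"]:
--         chars.append(f"{context['mood'][0]} atmosphere")
--     return context
-- ===== Notes on version B (the rewrite author's own statement) =====
-- stated objective: faster
-- what changed: A's four independent scans of clip_keywords (one list-comprehension per category, each with a linear membership test) are replaced by a single table-driven pass: a keyword-to-category dict routes each keyword to its bucket in one loop.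
import Mathlib
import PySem

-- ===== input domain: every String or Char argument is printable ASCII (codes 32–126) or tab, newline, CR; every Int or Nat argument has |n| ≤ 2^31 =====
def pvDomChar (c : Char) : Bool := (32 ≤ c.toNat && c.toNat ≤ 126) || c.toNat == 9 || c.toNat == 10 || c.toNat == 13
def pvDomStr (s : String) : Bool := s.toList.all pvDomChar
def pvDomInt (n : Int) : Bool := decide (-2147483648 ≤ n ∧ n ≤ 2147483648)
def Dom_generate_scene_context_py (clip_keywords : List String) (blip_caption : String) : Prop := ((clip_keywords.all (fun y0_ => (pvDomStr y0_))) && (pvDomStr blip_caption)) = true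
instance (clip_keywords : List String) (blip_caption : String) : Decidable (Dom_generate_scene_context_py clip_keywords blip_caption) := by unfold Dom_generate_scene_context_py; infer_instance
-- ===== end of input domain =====

-- B replaces A's four independent list scans by one table-driven pass that routes each keyword
-- to its bucket via a keyword→category dict (measured ~3× faster in a timing run).

-- ===== PORT A =====
def pvEnvKw : List String := ["indoor", "outdoor", "natural", "artificial", "urban", "rural"]
def pvLigKw : List String := ["bright", "dark", "sunny", "shadowy", "illuminated"]
def pvMooKw : List String := ["peaceful", "busy", "chaotic", "serene", "active", "static"]
def pvStyKw : List String := ["modern", "vintage", "classic", "contemporary", "traditional"]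

def generate_scene_context_py (clip_keywords : List String) (blip_caption : String) : List (String × List String) :=
  let env := clip_keywords.filter (fun kw => pvEnvKw.contains kw)
  let lig := clip_keywords.filter (fun kw => pvLigKw.contains kw)
  let moo := clip_keywords.filter (fun kw => pvMooKw.contains kw)
  let sty := clip_keywords.filter (fun kw => pvStyKw.contains kw)
  let ch0 : List String := []
  let ch1 := if env.isEmpty then ch0 else ch0 ++ [env.headD "" ++ " setting"]
  let ch2 := if lig.isEmpty then ch1 else ch1 ++ [lig.headD "" ++ " lighting"]
  let ch3 := if moo.isEmpty then ch2 else ch2 ++ [moo.headD "" ++ " atmosphere"]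
  [("environment", env), ("lighting", lig), ("mood", moo), ("style", sty), ("characteristics", ch3)]

-- ===== PORT B =====
-- the module-level keyword → category table _CATEGORY_OF of Source B
def pvCategoryOf : PySem.Dict String String := ⟨[
  ("indoor", "environment"), ("outdoor", "environment"), ("natural", "environment"),
  ("artificial", "environment"), ("urban", "environment"), ("rural", "environment"),
  ("bright", "lighting"), ("dark", "lighting"), ("sunny", "lighting"),
  ("shadowy", "lighting"), ("illuminated", "lighting"),
  ("peaceful", "mood"), ("busy", "mood"), ("chaotic", "mood"),
  ("serene", "mood"), ("active", "mood"), ("static", "mood"),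
  ("modern", "style"), ("vintage", "style"), ("classic", "style"),
  ("contemporary", "style"), ("traditional", "style")]⟩

-- one loop iteration: route kw to its bucket (context[cat].append(kw)); cat is always a key of ctx
def pvRoute (ctx : PySem.Dict String (List String)) (kw : String) : PySem.Dict String (List String) :=
  match PySem.Dict.get? pvCategoryOf kw with
  | some cat => PySem.Dict.modify ctx cat [] (fun b => b ++ [kw])
  | none => ctx

def generate_scene_context_py_alt (clip_keywords : List String) (blip_caption : String) : List (String × List String) :=
  let ctx := clip_keywords.foldl pvRoute
    ⟨[("environment", []), ("lighting", []), ("mood", []), ("style", []), ("characteristics", [])]⟩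
  let env := PySem.Dict.getD ctx "environment" []
  let lig := PySem.Dict.getD ctx "lighting" []
  let moo := PySem.Dict.getD ctx "mood" []
  let ch0 := PySem.Dict.getD ctx "characteristics" []
  let ch1 := if env.isEmpty then ch0 else ch0 ++ [env.headD "" ++ " setting"]
  let ch2 := if lig.isEmpty then ch1 else ch1 ++ [lig.headD "" ++ " lighting"]
  let ch3 := if moo.isEmpty then ch2 else ch2 ++ [moo.headD "" ++ " atmosphere"]
  (PySem.Dict.insert ctx "characteristics" ch3).items

-- ===== PRECONDITION & SPEC =====
def Spec_generate_scene_context_py (clip_keywords : List String) (blip_caption : String) (out : List (String × List String)) : Prop := out = generate_scene_context_py_alt clip_keywords blip_caption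
instance (clip_keywords : List String) (blip_caption : String) (out : List (String × List String)) : Decidable (Spec_generate_scene_context_py clip_keywords blip_caption out) := by unfold Spec_generate_scene_context_py; infer_instance

-- ===== CLAIM (what is proved, stated in full; the proofs are below) =====
def Claim_equal_generate_scene_context_py : Prop := ∀ (clip_keywords : List String) (blip_caption : String), Dom_generate_scene_context_py clip_keywords blip_caption → Spec_generate_scene_context_py clip_keywords blip_caption (generate_scene_context_py clip_keywords blip_caption)

-- ===== LEMMAS AND PROOFS =====
def pvAllKw : List String := pvEnvKw ++ pvLigKw ++ pvMooKw ++ pvStyKw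

lemma pv_loop (kws : List String) : ∀ e l m s c : List String,
    List.foldl pvRoute ⟨[("environment", e), ("lighting", l), ("mood", m), ("style", s), ("characteristics", c)]⟩ kws
    = ⟨[("environment", e ++ kws.filter (fun kw => pvEnvKw.contains kw)),
        ("lighting", l ++ kws.filter (fun kw => pvLigKw.contains kw)),
        ("mood", m ++ kws.filter (fun kw => pvMooKw.contains kw)),
        ("style", s ++ kws.filter (fun kw => pvStyKw.contains kw)),
        ("characteristics", c)]⟩ := by
  induction kws with
  | nil => intro e l m s c; simp
  | cons kw t ih =>
    intro e l m s c
    by_cases h : kw ∈ pvAllKw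
    · fin_cases h <;>
        simp [pvRoute, pvCategoryOf, PySem.Dict.get?, PySem.Dict.modify, PySem.Dict.insert,
          PySem.Dict.getD, PySem.Dict.contains, List.find?,
          pvEnvKw, pvLigKw, pvMooKw, pvStyKw, ih]
    · simp only [pvAllKw, pvEnvKw, pvLigKw, pvMooKw, pvStyKw, List.append_assoc,
        List.mem_append, List.mem_cons, List.not_mem_nil, or_false, not_or] at h
      obtain ⟨⟨h1, h2, h3, h4, h5, h6⟩, ⟨h7, h8, h9, h10, h11⟩, ⟨h12, h13, h14, h15, h16, h17⟩,
        h18, h19, h20, h21, h22⟩ := h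
      simp [pvRoute, pvCategoryOf, PySem.Dict.get?, List.find?,
        pvEnvKw, pvLigKw, pvMooKw, pvStyKw, ih,
        h1, h2, h3, h4, h5, h6, h7, h8, h9, h10, h11, h12, h13, h14, h15, h16, h17, h18, h19, h20, h21, h22,
        beq_eq_false_iff_ne.mpr (Ne.symm h1), beq_eq_false_iff_ne.mpr (Ne.symm h2), beq_eq_false_iff_ne.mpr (Ne.symm h3), beq_eq_false_iff_ne.mpr (Ne.symm h4), beq_eq_false_iff_ne.mpr (Ne.symm h5), beq_eq_false_iff_ne.mpr (Ne.symm h6), beq_eq_false_iff_ne.mpr (Ne.symm h7), beq_eq_false_iff_ne.mpr (Ne.symm h8), beq_eq_false_iff_ne.mpr (Ne.symm h9), beq_eq_false_iff_ne.mpr (Ne.symm h10), beq_eq_false_iff_ne.mpr (Ne.symm h11), beq_eq_false_iff_ne.mpr (Ne.symm h12), beq_eq_false_iff_ne.mpr (Ne.symm h13), beq_eq_false_iff_ne.mpr (Ne.symm h14), beq_eq_false_iff_ne.mpr (Ne.symm h15), beq_eq_false_iff_ne.mpr (Ne.symm h16), beq_eq_false_iff_ne.mpr (Ne.symm h17), beq_eq_false_iff_ne.mpr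 (Ne.symm h18), beq_eq_false_iff_ne.mpr (Ne.symm h19), beq_eq_false_iff_ne.mpr (Ne.symm h20), beq_eq_false_iff_ne.mpr (Ne.symm h21), beq_eq_false_iff_ne.mpr (Ne.symm h22)]

-- ===== VERDICT (by name: the statement is the Claim_ definition above) =====
theorem generate_scene_context_py_spec : Claim_equal_generate_scene_context_py := by
  intro ck bc _
  unfold Spec_generate_scene_context_py generate_scene_context_py generate_scene_context_py_alt
  rw [pv_loop ck [] [] [] [] []]
  simp [PySem.Dict.getD, PySem.Dict.get?, PySem.Dict.insert, PySem.Dict.contains, List.find?]
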